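-- pv_equiv track=rewrite | github.com/MinJeong16/Algorithm | before/python_code/기능개발.py | solution
-- ===== SOURCE A (Python) =====
-- def work_per_day(progress, speed):
--     answer = (100 - progress) // speed
--     if (100- progress) % speed != 0:  # 나누어떨어지지 않으면
--         answer += 1
--     return answer
--
-- def solution(progresses, speeds):
--     answer = []
--     times = []
--     # 몇 일간 작업 후 배포가 가능한지를 times 배열에 저장
--     for i in range(len(progresses)):
--         times.append(work_per_day(progresses[i], speeds[i]))
--
--     idx = 0  # 배포되는 작업의 인덱스
--
--     while True:
--         if sum(answer) == len(times):
--             break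
--         release = times[idx]  # 배포될 작업에 소요된 시간
--         count = 1
--         flag = False
--         for i in range(idx + 1, len(times)):
--             if times[i] <= release:
--                 count += 1
--             else:
--                 answer.append(count)
--                 idx = i
--                 flag = True
--                 break
--         if not flag:  # answer에 저장되지 않고 남은 값
--             answer.append(count)
--
--     return answer
-- ===== SOURCE B (Python) =====
-- def solution(progresses, speeds):
--     # Single linear pass: ceil days via -((p-100)//s), group while time <= current leader's time.
--     answer = []
--     lead = None
--     cnt = 0
--     for p, s in zip(progresses, speeds):
--         t = -((p - 100) // s)
--         if lead is None or t > lead: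
--             if cnt:
--                 answer.append(cnt)
--             lead, cnt = t, 1
--         else:
--             cnt += 1
--     if cnt:
--         answer.append(cnt)
--     return answer
-- ===== Notes on version B (the rewrite author's own statement) =====
-- stated objective: faster
-- what changed: Replaced the repeated sum(answer) check and re-scan from idx with a single linear pass that keeps the current group's leading time and count, using branch-free ceiling division -((p-100)//s).
-- outside the precondition, e.g. on solution([30], [0]): A raises ZeroDivisionError, B raises ZeroDivisionError; on solution([30, 30], [10]): A raises IndexError, B returns [1]
import Mathlib
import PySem

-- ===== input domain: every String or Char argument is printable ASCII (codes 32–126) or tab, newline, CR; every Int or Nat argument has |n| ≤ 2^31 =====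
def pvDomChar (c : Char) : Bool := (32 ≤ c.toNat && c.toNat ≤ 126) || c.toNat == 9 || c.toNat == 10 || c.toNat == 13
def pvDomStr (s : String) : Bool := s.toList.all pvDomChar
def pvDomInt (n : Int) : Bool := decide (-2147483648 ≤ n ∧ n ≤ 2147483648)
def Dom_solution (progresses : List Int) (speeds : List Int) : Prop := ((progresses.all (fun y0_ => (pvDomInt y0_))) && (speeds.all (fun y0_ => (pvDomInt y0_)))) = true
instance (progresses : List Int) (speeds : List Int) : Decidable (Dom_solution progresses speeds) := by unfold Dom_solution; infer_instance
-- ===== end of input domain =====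

-- B replaces A's quadratic re-scan loop (sum(answer) check + inner scan from idx) by one linear
-- pass keeping the current group's leading time and count; ceiling division via -((p-100)//s).


-- ===== PORT A =====
def work_per_day (progress : Int) (speed : Int) : Int :=
  let answer := PySem.Int.floordiv (100 - progress) speed
  if PySem.Int.mod (100 - progress) speed ≠ 0 then answer + 1 else answer

-- for i in range(len(progresses)): times.append(work_per_day(progresses[i], speeds[i]))
-- (pyGetD's default is never used: i < len(progresses) ≤ len(speeds) under Pre_)
def timesLoopA (progresses : List Int) (speeds : List Int) : List Int :=
  (PySem.List.pyRange 0 (PySem.List.len progresses)).foldl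
    (fun times i =>
      times ++ [work_per_day (PySem.List.pyGetD progresses i 0)
                             (PySem.List.pyGetD speeds i 0)]) []

-- for i in range(idx+1, len(times)): returns (count, some i) on break, (count, none) otherwise
def innerA (times : List Int) (release : Int) : List Nat → Int → Int × Option Nat
  | [], count => (count, none)
  | i :: rest, count =>
    if PySem.List.pyGetD times (i : Int) 0 ≤ release then innerA times release rest (count + 1)
    else (count, some i)

-- the 'while True' loop; each pass either breaks or strictly advances idx, so
-- fuel = len(times)+1 passes always suffice (the fuel-0 branch is unreachable).
def loopA (times : List Int) : Nat → List Int → Nat → List Int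
  | 0, answer, _ => answer
  | fuel + 1, answer, idx =>
    if answer.sum = PySem.List.len times then answer
    else
      let release := PySem.List.pyGetD times (idx : Int) 0
      match innerA times release (List.range' (idx + 1) (times.length - (idx + 1))) 1 with
      | (count, none) => answer ++ [count]
      | (count, some i) => loopA times fuel (answer ++ [count]) i

def solution (progresses : List Int) (speeds : List Int) : List Int :=
  let times := timesLoopA progresses speeds
  loopA times (times.length + 1) [] 0

-- ===== PORT B =====
-- state: (answer, lead, cnt); lead = None encoded as Option
def altGo : List (Int × Int) → List Int → Option Int → Int → List Int
  | [], answer, _, cnt => if cnt ≠ 0 then answer ++ [cnt] else answer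
  | (p, s) :: rest, answer, lead, cnt =>
    let t := -(PySem.Int.floordiv (p - 100) s)
    match lead with
    | none => altGo rest (if cnt ≠ 0 then answer ++ [cnt] else answer) (some t) 1
    | some l =>
      if t > l then altGo rest (if cnt ≠ 0 then answer ++ [cnt] else answer) (some t) 1
      else altGo rest answer (some l) (cnt + 1)

def solution_alt (progresses : List Int) (speeds : List Int) : List Int :=
  altGo (progresses.zip speeds) [] none 0

-- ===== PRECONDITION & SPEC =====
-- A raises IndexError when speeds is shorter than progresses, and ZeroDivisionError when a used
-- speed is 0; Pre_ excludes exactly those inputs.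
def Pre_solution (progresses : List Int) (speeds : List Int) : Prop :=
  progresses.length ≤ speeds.length ∧ (0 : Int) ∉ speeds.take progresses.length
instance (progresses : List Int) (speeds : List Int) : Decidable (Pre_solution progresses speeds) := by
  unfold Pre_solution; infer_instance

def pvWitness_solution : List Int × List Int := ([93, 30, 55], [1, 30, 5])

def Spec_solution (progresses : List Int) (speeds : List Int) (out : List Int) : Prop :=
  out = solution_alt progresses speeds
instance (progresses : List Int) (speeds : List Int) (out : List Int) : Decidable (Spec_solution progresses speeds out) := by
  unfold Spec_solution; infer_instance

-- ===== CLAIM (what is proved, stated in full; the proofs are below) =====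
def Claim_equal_solution : Prop := ∀ (progresses : List Int) (speeds : List Int), Dom_solution progresses speeds → Pre_solution progresses speeds → Spec_solution progresses speeds (solution progresses speeds)

-- ===== LEMMAS AND PROOFS =====

-- reference grouping of a list of completion times
def groupGo : List Int → Int → Int → List Int
  | [], _, cnt => [cnt]
  | t :: rest, lead, cnt =>
    if t ≤ lead then groupGo rest lead (cnt + 1) else cnt :: groupGo rest t 1

def groupT : List Int → List Int
  | [] => []
  | t :: rest => groupGo rest t 1

-- ceiling division, positive divisor
theorem ceil_pos (a b : Int) (hb : 0 < b) :
    (if PySem.Int.mod a b ≠ 0 then PySem.Int.floordiv a b + 1 else PySem.Int.floordiv a b)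
      = -(PySem.Int.floordiv (-a) b) := by
  have hmul := PySem.Int.floordiv_mul_add_mod a b
  have h0 := PySem.Int.mod_nonneg a hb
  have hlt := PySem.Int.mod_lt a hb
  rw [eq_comm]
  split_ifs with h
  · have hpos : 0 < PySem.Int.mod a b := lt_of_le_of_ne h0 (Ne.symm h)
    rw [PySem.Int.neg_floordiv_neg_eq_iff_of_pos hb]
    constructor <;> nlinarith
  · simp only [ne_eq, not_not] at h
    rw [PySem.Int.neg_floordiv_neg_eq_iff_of_pos hb]
    constructor <;> nlinarith

theorem wpd_eq (p s : Int) (hs : s ≠ 0) :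
    work_per_day p s = -(PySem.Int.floordiv (p - 100) s) := by
  unfold work_per_day
  dsimp only
  rcases lt_or_gt_of_ne hs with hneg | hpos
  · have key := ceil_pos (p - 100) (-s) (by omega)
    have e1 : PySem.Int.floordiv (p - 100) (-s) = PySem.Int.floordiv (100 - p) s := by
      rw [show (p - 100 : Int) = -(100 - p) by ring, PySem.Int.floordiv_neg_neg]
    have e2 : PySem.Int.mod (p - 100) (-s) = -PySem.Int.mod (100 - p) s := by
      rw [show (p - 100 : Int) = -(100 - p) by ring, PySem.Int.mod_neg_neg]
    have e3 : PySem.Int.floordiv (-(p - 100)) (-s) = PySem.Int.floordiv (p - 100) s :=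
      PySem.Int.floordiv_neg_neg _ _
    rw [e1, e2, e3] at key
    simpa [neg_eq_zero] using key
  · have key := ceil_pos (100 - p) s hpos
    rw [show (-(100 - p) : Int) = p - 100 by ring] at key
    exact key

-- B computes groupT of the times list
theorem altGo_some (pairs : List (Int × Int)) :
    ∀ answer lead cnt, 0 < cnt →
    altGo pairs answer (some lead) cnt
      = answer ++ groupGo (pairs.map (fun q => -(PySem.Int.floordiv (q.1 - 100) q.2))) lead cnt := by
  induction pairs with
  | nil => intro answer lead cnt hc; simp [altGo, groupGo]; omega
  | cons q rest ih =>
    intro answer lead cnt hc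
    obtain ⟨p, s⟩ := q
    simp only [altGo, List.map_cons, groupGo]
    by_cases h : -(PySem.Int.floordiv (p - 100) s) ≤ lead
    · rw [if_neg (by omega), if_pos h]
      exact ih answer lead (cnt + 1) (by omega)
    · rw [if_pos (by omega), if_neg h, if_pos (by omega)]
      rw [ih (answer ++ [cnt]) _ 1 (by omega)]
      simp

theorem alt_eq_group (progresses speeds : List Int) :
    solution_alt progresses speeds
      = groupT ((progresses.zip speeds).map (fun q => -(PySem.Int.floordiv (q.1 - 100) q.2))) := by
  unfold solution_alt
  cases h : progresses.zip speeds with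
  | nil => simp [altGo, groupT]
  | cons q rest =>
    obtain ⟨p, s⟩ := q
    simp only [altGo, List.map_cons, groupT]
    rw [if_neg (show ¬((0 : Int) ≠ 0) by simp)]
    rw [altGo_some rest [] _ 1 (by omega)]
    simp

-- A's times list
theorem timesLoopA_eq (progresses speeds : List Int) (hlen : progresses.length ≤ speeds.length) :
    timesLoopA progresses speeds
      = (progresses.zip speeds).map (fun q => work_per_day q.1 q.2) := by
  unfold timesLoopA
  rw [PySem.List.len_eq, PySem.List.pyRange_zero_natCast,
    PySem.List.foldl_append_singleton_eq_map]
  apply List.ext_getElem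
  · simp; omega
  · intro i h1 h2
    have hi : i < progresses.length := by simpa using h1
    simp only [List.nil_append, List.getElem_map, List.getElem_zip, List.getElem_range]
    rw [PySem.List.pyGetD_natCast, PySem.List.pyGetD_natCast,
      List.getD_eq_getElem progresses 0 hi, List.getD_eq_getElem speeds 0 (by omega)]

-- the inner for-loop + continuation equals groupGo on the suffix
theorem inner_run (times : List Int) (release : Int) (m : Nat)
    (IH : ∀ answer idx, idx < times.length → answer.sum = (idx : Int) →
          times.length - idx < m → loopA times m answer idx = answer ++ groupT (times.drop idx)) :
    ∀ n j c answer, times.length - j = n → j ≤ times.length → answer.sum + c = (j : Int) →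
      times.length - j < m →
    (match innerA times release (List.range' j (times.length - j)) c with
     | (count, none) => answer ++ [count]
     | (count, some i) => loopA times m (answer ++ [count]) i)
      = answer ++ groupGo (times.drop j) release c := by
  intro n
  induction n with
  | zero =>
    intro j c answer hn hj hsum hm
    have hj' : j = times.length := by omega
    rw [hn]
    simp [innerA, List.drop_eq_nil_of_le (by omega : times.length ≤ j), groupGo]
  | succ k ihk =>
    intro j c answer hn hj hsum hm
    have hjlt : j < times.length := by omega
    rw [hn, List.range'_succ]
    have hdrop : times.drop j = times[j] :: times.drop (j + 1) :=
      List.drop_eq_getElem_cons hjlt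
    have hget : PySem.List.pyGetD times (j : Int) 0 = times[j] := by
      simp [PySem.List.pyGetD_natCast, List.getD_eq_getElem?_getD, List.getElem?_eq_getElem hjlt]
    by_cases hle : times[j] ≤ release
    · simp only [innerA, hget, if_pos hle]
      have : times.length - (j + 1) = k := by omega
      rw [← this]
      rw [ihk (j + 1) (c + 1) answer (by omega) (by omega) (by push_cast; omega) (by omega)]
      rw [hdrop]
      simp [groupGo, hle]
    · simp only [innerA, hget, if_neg hle]
      rw [IH (answer ++ [c]) j hjlt (by simp; omega) (by omega)]
      rw [hdrop]
      simp [groupGo, hle, groupT]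

-- the while-loop computes groupT of the suffix
theorem loopA_eq (times : List Int) :
    ∀ fuel answer idx, idx < times.length → answer.sum = (idx : Int) →
      times.length - idx < fuel →
    loopA times fuel answer idx = answer ++ groupT (times.drop idx) := by
  intro fuel
  induction fuel with
  | zero => intro answer idx h1 _ h3; omega
  | succ m ih =>
    intro answer idx h1 hsum h3
    simp only [loopA]
    rw [if_neg (by simp [PySem.List.len_eq, hsum]; omega)]
    have hdrop : times.drop idx = times[idx] :: times.drop (idx + 1) :=
      List.drop_eq_getElem_cons h1
    have hget : PySem.List.pyGetD times (idx : Int) 0 = times[idx] := by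
      simp [PySem.List.pyGetD_natCast, List.getD_eq_getElem?_getD, List.getElem?_eq_getElem h1]
    rw [hget]
    rw [inner_run times times[idx] m ih (times.length - (idx + 1)) (idx + 1) 1 answer rfl
      (by omega) (by push_cast; omega) (by omega)]
    rw [hdrop]
    simp [groupT]

theorem solution_eq_group (progresses speeds : List Int)
    (hpre : Pre_solution progresses speeds) :
    solution progresses speeds
      = groupT ((progresses.zip speeds).map (fun q => work_per_day q.1 q.2)) := by
  obtain ⟨hlen, _⟩ := hpre
  unfold solution
  rw [timesLoopA_eq progresses speeds hlen]
  set times := (progresses.zip speeds).map (fun q => work_per_day q.1 q.2) with htimes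
  by_cases h : times = []
  · simp [h, loopA, PySem.List.len_eq, groupT]
  · have hlen' : 0 < times.length := List.length_pos_iff.mpr h
    simpa using loopA_eq times (times.length + 1) [] 0 hlen' (by simp) (by omega)

-- ===== VERDICT (by name: the statement is the Claim_ definition above) =====
theorem snd_mem_take_of_mem_zip (p s : List Int) (q : Int × Int) (hq : q ∈ p.zip s) :
    q.2 ∈ s.take p.length := by
  induction p generalizing s q with
  | nil => simp at hq
  | cons a p' ih =>
    cases s with
    | nil => simp at hq
    | cons b s' =>
      rw [List.zip_cons_cons, List.mem_cons] at hq
      rcases hq with h | h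
      · simp [h]
      · simpa using Or.inr (ih s' q h)

theorem solution_spec : Claim_equal_solution := by
  intro progresses speeds _ hpre
  unfold Spec_solution
  rw [solution_eq_group progresses speeds hpre, alt_eq_group]
  congr 1
  apply List.map_congr_left
  intro q hq
  have hmem := snd_mem_take_of_mem_zip progresses speeds q hq
  have hs : q.2 ≠ 0 := fun h0 => hpre.2 (h0 ▸ hmem)
  exact wpd_eq q.1 q.2 hs
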